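-- pv_equiv track=rewrite | github.com/lancelote/advent_of_code | src/year2018/day02a.py | solve
-- ===== SOURCE A (Python) =====
-- from collections import Counter
-- from collections.abc import Iterator
--
-- def process_data(data: str) -> Iterator[Counter[str]]:
--     """Create stream of counters for each input line."""
--     for box in data.strip().split("\n"):
--         yield Counter(box)
--
-- def solve(task: str) -> int:
--     """Calculate input checksum."""
--     twos = 0
--     threes = 0
--     for box in process_data(task):
--         if 2 in box.values():
--             twos += 1
--         if 3 in box.values():
--             threes += 1
--     return twos * threes
-- ===== SOURCE B (Python) =====
-- def solve(task):
--     """Calculate input checksum."""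
--     twos = 0
--     threes = 0
--     for box in task.strip().split("\n"):
--         chars = sorted(box)
--         runs = set()
--         i = 0
--         n = len(chars)
--         while i < n:
--             j = i
--             while j < n and chars[j] == chars[i]:
--                 j += 1
--             runs.add(j - i)
--             i = j
--         if 2 in runs:
--             twos += 1
--         if 3 in runs:
--             threes += 1
--     return twos * threes
-- ===== Notes on version B (the rewrite author's own statement) =====
-- stated objective: alternative
-- what changed: Per line, B sorts the characters and scans maximal runs with two indices, collecting run lengths into a set, instead of building a Counter hash table and testing its values.
import Mathlib
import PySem

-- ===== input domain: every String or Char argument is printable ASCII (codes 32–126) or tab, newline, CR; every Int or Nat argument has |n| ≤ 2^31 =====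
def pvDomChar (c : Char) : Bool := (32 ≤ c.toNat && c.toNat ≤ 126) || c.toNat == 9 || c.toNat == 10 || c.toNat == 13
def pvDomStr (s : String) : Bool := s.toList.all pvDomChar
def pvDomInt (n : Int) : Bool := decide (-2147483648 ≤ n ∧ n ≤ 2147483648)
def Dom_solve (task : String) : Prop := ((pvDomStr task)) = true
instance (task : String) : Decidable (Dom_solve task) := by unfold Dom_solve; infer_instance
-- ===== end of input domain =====

-- B replaces each line's Counter hash table by sort + run-length scan over the sorted characters (objective: alternative).

-- ===== PORT A =====
def solve (task : String) : Int :=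
  let boxes := PySem.Chars.splitOn (PySem.Chars.strip task.toList) ['\n']
  let st := boxes.foldl (fun (s : Int × Int) box =>
      let cnt := PySem.Dict.counter box
      let s1 := if cnt.values.contains (2 : Int) then (s.1 + 1, s.2) else s
      if cnt.values.contains (3 : Int) then (s1.1, s1.2 + 1) else s1) (0, 0)
  st.1 * st.2

-- ===== PORT B =====
-- inner while loops of B: peel one maximal run off the (sorted) character list, record its length
def runLens : List Char → List Int
  | [] => []
  | c :: rest =>
      ((rest.takeWhile (· == c)).length + 1 : Int)
        :: runLens (rest.dropWhile (· == c))
termination_by l => l.length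
decreasing_by
  simp only [List.length_cons]
  exact Nat.lt_succ_of_le (List.length_dropWhile_le _ _)

def solve_alt (task : String) : Int :=
  let boxes := PySem.Chars.splitOn (PySem.Chars.strip task.toList) ['\n']
  let st := boxes.foldl (fun (s : Int × Int) box =>
      let chars := PySem.List.sorted box (fun c => c)
      let runs : PySem.Set Int := PySem.Set.ofList (runLens chars)
      let s1 := if runs.contains (2 : Int) then (s.1 + 1, s.2) else s
      if runs.contains (3 : Int) then (s1.1, s1.2 + 1) else s1) (0, 0)
  st.1 * st.2

-- ===== PRECONDITION & SPEC =====
def Spec_solve (task : String) (out : Int) : Prop := out = solve_alt task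
instance (task : String) (out : Int) : Decidable (Spec_solve task out) := by unfold Spec_solve; infer_instance

-- ===== CLAIM (what is proved, stated in full; the proofs are below) =====
def Claim_equal_solve : Prop := ∀ (task : String), Dom_solve task → Spec_solve task (solve task)

-- ===== LEMMAS AND PROOFS =====

-- a value ≤ every element of a sorted list does not occur past its leading run
lemma not_mem_dropWhile_of_sorted (c : Char) (l : List Char)
    (hs : l.Pairwise (· ≤ ·)) (hall : ∀ x ∈ l, c ≤ x) :
    c ∉ l.dropWhile (· == c) := by
  induction l with
  | nil => simp
  | cons x xs ih =>
    by_cases hx : x = c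
    · subst hx
      simpa using ih hs.tail (fun y hy => hall y (List.mem_cons_of_mem _ hy))
    · rw [List.dropWhile_cons_of_neg (by simpa using hx)]
      intro hmem
      rcases List.mem_cons.mp hmem with h | h
      · exact hx h.symm
      · have hxc : x ≤ c := (List.pairwise_cons.mp hs).1 c h
        have hcx : c ≤ x := hall x List.mem_cons_self
        exact hx (le_antisymm hxc hcx)

-- the distinct elements of an all-equal list
lemma ofList_const (y : Char) (ys : List Char) (h : ∀ x ∈ ys, x = y) :
    PySem.Set.ofList ys = [] ∨ PySem.Set.ofList ys = [y] := by
  induction ys with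
  | nil => exact Or.inl rfl
  | cons z zs ih =>
    have hz : z = y := h z List.mem_cons_self
    subst hz
    right
    rw [PySem.Set.ofList_cons]
    rcases ih (fun x hx => h x (List.mem_cons_of_mem _ hx)) with h0 | h0 <;>
      simp [h0, PySem.Set.discard]

-- run lengths of a sorted list are exactly the per-distinct-element counts
lemma runLens_sorted (l : List Char) (hs : l.Pairwise (· ≤ ·)) :
    runLens l = (PySem.Set.ofList l).map (fun c => (l.count c : Int)) := by
  induction l using runLens.induct with
  | case1 => simp [runLens]
  | case2 c rest ih =>
    have htd := (List.takeWhile_append_dropWhile (p := (· == c)) (l := rest)).symm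
    have htall : ∀ x ∈ rest.takeWhile (· == c), x = c := by
      intro x hx
      simpa using List.mem_takeWhile_imp hx
    have hcnot : c ∉ rest.dropWhile (· == c) :=
      not_mem_dropWhile_of_sorted c rest hs.tail
        (fun x hx => (List.pairwise_cons.mp hs).1 x hx)
    have hdsorted : (rest.dropWhile (· == c)).Pairwise (· ≤ ·) :=
      hs.tail.sublist (List.dropWhile_sublist _)
    rw [runLens, ih hdsorted]
    -- head: the leading run length is the count of c in c :: rest
    have hcount : (c :: rest).count c = (rest.takeWhile (· == c)).length + 1 := by
      rw [List.count_cons_self]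
      congr 1
      conv_lhs => rw [htd]
      rw [List.count_append]
      have h1 : (rest.takeWhile (· == c)).count c
          = (rest.takeWhile (· == c)).length :=
        List.count_eq_length.mpr (fun b hb => (htall b hb).symm)
      have h2 : (rest.dropWhile (· == c)).count c = 0 :=
        List.count_eq_zero.mpr hcnot
      omega
    -- distinct elements: c followed by those of the tail past the run
    have hof : PySem.Set.ofList (c :: rest)
        = c :: PySem.Set.ofList (rest.dropWhile (· == c)) := by
      rw [PySem.Set.ofList_cons]
      congr 1
      conv_lhs => rw [htd]
      rw [PySem.Set.ofList_append]
      have hdisc : PySem.Set.discard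
          (PySem.Set.ofList (rest.dropWhile (· == c))) c
          = PySem.Set.ofList (rest.dropWhile (· == c)) := by
        simp only [PySem.Set.discard, List.filter_eq_self]
        intro a ha
        have ha' : a ∈ rest.dropWhile (· == c) := (PySem.Set.mem_ofList _ _).mp ha
        have hac : a ≠ c := fun h => hcnot (h ▸ ha')
        simp [hac]
      rcases ofList_const c _ htall with h0 | h0
      · rw [h0, PySem.Set.update_nil_left, hdisc]
      · rw [h0, PySem.Set.update_eq_append_filter]
        have : (PySem.Set.ofList (rest.dropWhile (· == c))).filter
            (fun y => !(PySem.Set.contains [c] y))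
            = PySem.Set.ofList (rest.dropWhile (· == c)) := by
          rw [List.filter_eq_self]
          intro a ha
          have ha' : a ∈ rest.dropWhile (· == c) := (PySem.Set.mem_ofList _ _).mp ha
          have hac : a ≠ c := fun h => hcnot (h ▸ ha')
          simp [PySem.Set.contains, hac]
        rw [this]
        have hstep : PySem.Set.discard
            ([c] ++ PySem.Set.ofList (rest.dropWhile (· == c))) c
            = PySem.Set.discard (PySem.Set.ofList (rest.dropWhile (· == c))) c := by
          simp [PySem.Set.discard]
        rw [hstep, hdisc]
    rw [hof, List.map_cons]
    congr 1
    · rw [hcount]; push_cast; ring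
    · apply List.map_congr_left
      intro k hk
      have hkmem : k ∈ rest.dropWhile (· == c) := (PySem.Set.mem_ofList _ _).mp hk
      have hkc : k ≠ c := fun h => hcnot (h ▸ hkmem)
      have : (c :: rest).count k = (rest.dropWhile (· == c)).count k := by
        have h3 : (c :: rest).count k = rest.count k := by
          simp [List.count_cons]
          exact fun h => hkc h.symm
        have h4 : (rest.takeWhile (· == c)).count k = 0 :=
          List.count_eq_zero.mpr (fun h => hkc (htall k h))
        rw [h3]
        conv_lhs => rw [htd, List.count_append]
        rw [h4]
        omega
      rw [this]

-- per-line: B's run-length set contains k iff A's Counter values contain k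
lemma runs_contains_eq (box : List Char) (k : Int) :
    (PySem.Set.ofList (runLens (PySem.List.sorted box (fun c => c)))).contains k
      = (PySem.Dict.counter box).values.contains k := by
  have hs := PySem.List.sorted_pairwise box (fun c => c)
  have hperm := PySem.List.sorted_perm box (fun c => c) false
  rw [Bool.eq_iff_iff, PySem.Set.contains_iff, List.contains_iff_mem,
    PySem.Set.mem_ofList, runLens_sorted _ hs]
  simp only [hperm.count_eq]
  have hvals : (PySem.Dict.counter box).values
      = (PySem.Set.ofList box).map (fun c => (box.count c : Int)) := by
    show ((PySem.Dict.counter box).items).map (·.2) = _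
    rw [PySem.Dict.items_counter]
    simp
  rw [hvals]
  constructor <;>
  · rintro hmem
    rcases List.mem_map.mp hmem with ⟨c, hc, hck⟩
    refine List.mem_map.mpr ⟨c, ?_, hck⟩
    rw [PySem.Set.mem_ofList] at hc ⊢
    first
      | exact hperm.mem_iff.mp hc
      | exact hperm.mem_iff.mpr hc

-- ===== VERDICT (by name: the statement is the Claim_ definition above) =====
theorem solve_spec : Claim_equal_solve := by
  intro task _
  show solve task = solve_alt task
  unfold solve solve_alt
  simp only [runs_contains_eq]
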